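-- pv_equiv track=rewrite | github.com/lehaibg/primer-design | 06072018 Primer design.py | combinationlist
-- ===== SOURCE A (Python) =====
-- import itertools as it
--
-- def fastatextprocessing(seq):
--     seq=seq.split('\n')
--     seq=[i for i in seq if i!='']#take away any "empty" lines
--     nameindex=[i for i in range(0,len(seq)) if '>' in seq[i]]
--     return ({'name':nameindex,'sequencelist':seq})
--
-- def combinationlist(seqF,seqR):
--     seqF=fastatextprocessing(seqF)
--     seqR=fastatextprocessing(seqR)
--     listFname=[seqF['sequencelist'][i].replace('>','') for i in seqF['name']]
--     listRname=[seqR['sequencelist'][i].replace('>','') for i in seqR['name']]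
--     listFseq=[seqF['sequencelist'][i+1] for i in seqF['name']]
--     listRseq=[seqR['sequencelist'][i+1] for i in seqR['name']]
--     return ({'namecombo':list(it.product(listFname,listRname)),'seqcombo':list(it.product(listFseq,listRseq))})
-- ===== SOURCE B (Python) =====
-- def _scan(lines):
--     # structural recursion over the line list: look at the first two lines,
--     # record (name, following line) when the first is a header, recurse on the tail
--     if len(lines) < 2:
--         return [], []
--     names, seqs = _scan(lines[1:])
--     if '>' in lines[0]:
--         return [lines[0].replace('>', '')] + names, [lines[1]] + seqs
--     return names, seqs
--
-- def combinationlist(seqF, seqR):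
--     fnames, fseqs = _scan([l for l in seqF.split('\n') if l != ''])
--     rnames, rseqs = _scan([l for l in seqR.split('\n') if l != ''])
--     return {'namecombo': [(a, b) for a in fnames for b in rnames],
--             'seqcombo': [(x, y) for x in fseqs for y in rseqs]}
-- ===== Notes on version B (the rewrite author's own statement) =====
-- stated objective: alternative
-- what changed: B replaces A's index-table construction (range/filter over positions, then four separate index-based comprehensions into the line list) by an index-free structural recursion over the line list that pattern-matches the first two lines and builds the parallel name/sequence lists directly, then forms the two cartesian products.
import Mathlib
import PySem

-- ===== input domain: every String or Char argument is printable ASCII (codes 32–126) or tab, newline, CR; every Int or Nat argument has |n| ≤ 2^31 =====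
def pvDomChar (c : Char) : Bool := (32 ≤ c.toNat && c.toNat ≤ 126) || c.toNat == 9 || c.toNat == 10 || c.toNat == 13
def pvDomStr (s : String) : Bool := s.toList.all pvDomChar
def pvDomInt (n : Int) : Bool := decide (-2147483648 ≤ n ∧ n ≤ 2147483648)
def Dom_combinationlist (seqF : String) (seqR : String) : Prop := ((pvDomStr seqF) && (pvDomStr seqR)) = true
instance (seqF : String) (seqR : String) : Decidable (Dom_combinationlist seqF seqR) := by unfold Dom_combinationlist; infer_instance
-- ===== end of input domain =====

-- B replaces A's index-table construction by an index-free structural recursion over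
-- the line list (objective: alternative decomposition, same cost).

-- ===== PORT A =====
-- fastatextprocessing: the dict {'name': nameindex, 'sequencelist': seq} is returned as the
-- pair (nameindex, seq); the caller reads exactly these two fixed keys.
def pyFastaA (s : String) : List Int × List String :=
  let seq := (PySem.Str.split? s "\n").getD []  -- s.split("\n"): separator nonempty, split? is some
  let seq := seq.filter (fun l => l ≠ "")
  let nameindex := (PySem.List.pyRange 0 (seq.length : Int) 1).filter
      (fun i => PySem.Str.isIn ">" (PySem.List.pyGetD seq i ""))
  (nameindex, seq)

def combinationlist (seqF : String) (seqR : String) : List (String × List (String × String)) :=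
  let F := pyFastaA seqF
  let R := pyFastaA seqR
  let listFname := F.1.map (fun i => PySem.Str.replace (PySem.List.pyGetD F.2 i "") ">" "")
  let listRname := R.1.map (fun i => PySem.Str.replace (PySem.List.pyGetD R.2 i "") ">" "")
  -- seq[i+1]: Python raises IndexError when i+1 is out of range; Pre_ excludes that,
  -- so the "" default of pyGetD is never observed.
  let listFseq := F.1.map (fun i => PySem.List.pyGetD F.2 (i + 1) "")
  let listRseq := R.1.map (fun i => PySem.List.pyGetD R.2 (i + 1) "")
  [("namecombo", listFname.flatMap (fun a => listRname.map (fun b => (a, b)))),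
   ("seqcombo", listFseq.flatMap (fun a => listRseq.map (fun b => (a, b))))]

-- ===== PORT B =====
-- _scan: structural recursion over the line list, matching the first two lines.
def scanB : List String → List String × List String
  | [] => ([], [])
  | [_] => ([], [])
  | a :: b :: rest =>
    let p := scanB (b :: rest)
    if PySem.Str.isIn ">" a then (PySem.Str.replace a ">" "" :: p.1, b :: p.2) else p

def combinationlist_alt (seqF : String) (seqR : String) : List (String × List (String × String)) :=
  let F := scanB ((((PySem.Str.split? seqF "\n").getD [])).filter (fun l => l ≠ ""))
  let R := scanB ((((PySem.Str.split? seqR "\n").getD [])).filter (fun l => l ≠ ""))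
  [("namecombo", F.1.flatMap (fun a => R.1.map (fun b => (a, b)))),
   ("seqcombo", F.2.flatMap (fun x => R.2.map (fun y => (x, y))))]

-- ===== PRECONDITION & SPEC =====
-- A raises IndexError (seq[i+1]) exactly when the last non-empty line of an input is a '>'
-- header line; Pre_ excludes those inputs.
def Pre_combinationlist (seqF : String) (seqR : String) : Prop :=
  (((((PySem.Str.split? seqF "\n").getD [])).filter (fun l => l ≠ "")).getLast?.all
      (fun l => !PySem.Str.isIn ">" l)) = true ∧
  (((((PySem.Str.split? seqR "\n").getD [])).filter (fun l => l ≠ "")).getLast?.all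
      (fun l => !PySem.Str.isIn ">" l)) = true

instance (seqF : String) (seqR : String) : Decidable (Pre_combinationlist seqF seqR) := by
  unfold Pre_combinationlist; infer_instance

def pvWitness_combinationlist : String × String := (">a\nACGT", ">b\nTTT\n\n>c\nGG")

def Spec_combinationlist (seqF : String) (seqR : String) (out : List (String × List (String × String))) : Prop := out = combinationlist_alt seqF seqR
instance (seqF : String) (seqR : String) (out : List (String × List (String × String))) : Decidable (Spec_combinationlist seqF seqR out) := by unfold Spec_combinationlist; infer_instance

-- ===== CLAIM =====
def Claim_equal_combinationlist : Prop := ∀ (seqF : String) (seqR : String), Dom_combinationlist seqF seqR → Pre_combinationlist seqF seqR → Spec_combinationlist seqF seqR (combinationlist seqF seqR)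

-- ===== LEMMAS AND PROOFS =====

-- A's index lists, rephrased over Nat indices (List.getD), for the induction.
def aNamesNat (lines : List String) : List String :=
  ((List.range lines.length).filter (fun k => PySem.Str.isIn ">" (lines.getD k ""))).map
    (fun k => PySem.Str.replace (lines.getD k "") ">" "")

def aSeqsNat (lines : List String) : List String :=
  ((List.range lines.length).filter (fun k => PySem.Str.isIn ">" (lines.getD k ""))).map
    (fun k => lines.getD (k + 1) "")

theorem names_cons (a : String) (rest : List String) :
    aNamesNat (a :: rest)
      = (if PySem.Str.isIn ">" a then [PySem.Str.replace a ">" ""] else []) ++ aNamesNat rest := by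
  unfold aNamesNat
  rw [List.length_cons, List.range_succ_eq_map, List.filter_cons]
  by_cases ha : PySem.Str.isIn ">" a = true <;> [skip; skip] <;>
    (simp [PySem.Str.isIn] at ha;
     simp [ha, List.filter_map, List.map_map, Function.comp_def, List.getElem?_cons_succ])

theorem seqs_cons (a : String) (rest : List String) :
    aSeqsNat (a :: rest)
      = (if PySem.Str.isIn ">" a then [(a :: rest).getD 1 ""] else []) ++ aSeqsNat rest := by
  unfold aSeqsNat
  rw [List.length_cons, List.range_succ_eq_map, List.filter_cons]
  by_cases ha : PySem.Str.isIn ">" a = true <;> [skip; skip] <;>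
    (simp [PySem.Str.isIn] at ha;
     simp [ha, List.filter_map, List.map_map, Function.comp_def, List.getElem?_cons_succ])

theorem names_int_eq (lines : List String) :
    ((PySem.List.pyRange 0 (lines.length : Int) 1).filter
        (fun i => PySem.Str.isIn ">" (PySem.List.pyGetD lines i ""))).map
      (fun i => PySem.Str.replace (PySem.List.pyGetD lines i "") ">" "")
    = aNamesNat lines := by
  simp [PySem.List.pyRange_one, List.filter_map, List.map_map, Function.comp_def, aNamesNat,
    PySem.List.pyGetD_natCast, List.getD]

theorem seqs_int_eq (lines : List String) :
    ((PySem.List.pyRange 0 (lines.length : Int) 1).filter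
        (fun i => PySem.Str.isIn ">" (PySem.List.pyGetD lines i ""))).map
      (fun i => PySem.List.pyGetD lines (i + 1) "")
    = aSeqsNat lines := by
  have hk : ∀ k : Nat, PySem.List.pyGetD lines ((k : Int) + 1) "" = lines.getD (k + 1) "" := by
    intro k
    have h1 : ((k : Int) + 1) = ((k + 1 : Nat) : Int) := by push_cast; ring
    rw [h1, PySem.List.pyGetD_natCast]
  simp [PySem.List.pyRange_one, List.filter_map, List.map_map, Function.comp_def, aSeqsNat,
    PySem.List.pyGetD_natCast, hk, List.getD]

-- B's structural recursion computes exactly A's two lists whenever the last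
-- line is not a header (the hypothesis Pre_ supplies per input).
theorem scanB_eq (lines : List String)
    (h : lines.getLast?.all (fun l => !PySem.Str.isIn ">" l) = true) :
    scanB lines = (aNamesNat lines, aSeqsNat lines) := by
  induction lines with
  | nil => simp [scanB, aNamesNat, aSeqsNat]
  | cons a rest ih =>
    cases rest with
    | nil =>
      simp [List.getLast?] at h
      simp [scanB, aNamesNat, aSeqsNat, PySem.Str.isIn] at *
      simp [h]
    | cons b t =>
      have h' : (b :: t).getLast?.all (fun l => !PySem.Str.isIn ">" l) = true := by
        rwa [List.getLast?_cons_cons] at h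
      rw [names_cons, seqs_cons]
      simp only [scanB]
      rw [ih h']
      by_cases ha : PySem.Str.isIn ">" a = true <;> [skip; skip] <;>
        (simp [PySem.Str.isIn] at ha; simp [ha, List.getD])

-- ===== VERDICT =====
theorem combinationlist_spec : Claim_equal_combinationlist := by
  intro seqF seqR _ hpre
  obtain ⟨hF, hR⟩ := hpre
  unfold Spec_combinationlist combinationlist combinationlist_alt pyFastaA
  simp only [names_int_eq, seqs_int_eq, scanB_eq _ hF, scanB_eq _ hR]
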